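-- pv_equiv track=rewrite | github.com/hieudz0920/security-algorithm | Phần nâng cao/Bài 36.py | last_occrurrence_each_char
-- ===== SOURCE A (Python) =====
-- def loai_bo_trung_lap(s):
--     seen = set()
--     result = []
--     for char in s:
--         if char not in seen:
--             seen.add(char)
--             result.append(char)
--     return ''.join(result)
--
-- def last_occrurrence_each_char(text1, text2):
--     last_occurrence = {}
--     for i in range(len(text1)):
--         last_occurrence[text1[i]] = i
--     ds = loai_bo_trung_lap(text2)
--     for i in range(len(ds)):
--         if ds[i] not in last_occurrence:
--             last_occurrence[ds[i]] = -1
--     return last_occurrence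
-- ===== SOURCE B (Python) =====
-- def last_occrurrence_each_char(text1, text2):
--     result = {c: text1.rfind(c) for c in dict.fromkeys(text1)}
--     for c in text2:
--         result.setdefault(c, -1)
--     return result
-- ===== Notes on version B (the rewrite author's own statement) =====
-- stated objective: simpler
-- what changed: B drops A's dedup helper and index-overwrite loop: it builds the dict in one comprehension over dict.fromkeys(text1) with str.rfind for the last index, then seeds text2-only characters with setdefault over raw text2.
import Mathlib
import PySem

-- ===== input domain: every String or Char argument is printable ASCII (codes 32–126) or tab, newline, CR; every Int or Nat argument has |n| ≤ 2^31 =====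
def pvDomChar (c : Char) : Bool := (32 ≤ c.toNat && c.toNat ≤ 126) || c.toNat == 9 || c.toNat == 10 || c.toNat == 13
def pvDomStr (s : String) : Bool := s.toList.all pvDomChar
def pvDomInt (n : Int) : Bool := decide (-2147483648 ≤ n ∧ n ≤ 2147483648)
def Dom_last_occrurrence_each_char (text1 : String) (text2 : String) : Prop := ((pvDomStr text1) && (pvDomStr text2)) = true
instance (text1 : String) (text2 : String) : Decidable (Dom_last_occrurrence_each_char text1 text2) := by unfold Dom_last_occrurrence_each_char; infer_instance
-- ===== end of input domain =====

-- B replaces A's index-overwrite loop and its dedup helper by a dict comprehension over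
-- dict.fromkeys(text1) using str.rfind, plus setdefault over raw text2; objective: simpler.

-- ===== PORT A =====
-- Python's 1-character strings s[i] are modelled as String.ofList [c]; the pyGetD
-- default ' ' is never read, since every index produced by range(len(s)) is in range.
def pvKey (c : Char) : String := String.ofList [c]

def loai_bo_trung_lap (s : String) : String :=
  let p := s.toList.foldl
    (fun (p : PySem.Set Char × List Char) char =>
      if !(PySem.Set.contains p.1 char) then (PySem.Set.add p.1 char, p.2 ++ [char]) else p)
    (PySem.Set.empty, [])
  String.ofList p.2

def last_occrurrence_each_char (text1 : String) (text2 : String) : List (String × Int) :=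
  let last_occurrence : PySem.Dict String Int :=
    (PySem.List.pyRange 0 (PySem.Str.len text1) 1).foldl
      (fun d i => d.insert (pvKey (PySem.List.pyGetD text1.toList i ' ')) i)
      PySem.Dict.empty
  let ds := loai_bo_trung_lap text2
  let d2 :=
    (PySem.List.pyRange 0 (PySem.Str.len ds) 1).foldl
      (fun d i =>
        if d.contains (pvKey (PySem.List.pyGetD ds.toList i ' ')) then d
        else d.insert (pvKey (PySem.List.pyGetD ds.toList i ' ')) (-1))
      last_occurrence
  d2.items

-- ===== PORT B =====
def last_occrurrence_each_char_alt (text1 : String) (text2 : String) : List (String × Int) :=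
  let result : PySem.Dict String Int :=
    PySem.Dict.ofList ((PySem.List.dedup text1.toList).map
      (fun c => (pvKey c, PySem.Str.rfind text1 (pvKey c))))
  let result2 := text2.toList.foldl (fun d c => d.setdefault (pvKey c) (-1)) result
  result2.items

-- ===== PRECONDITION & SPEC =====
def Spec_last_occrurrence_each_char (text1 : String) (text2 : String) (out : List (String × Int)) : Prop := out = last_occrurrence_each_char_alt text1 text2
instance (text1 : String) (text2 : String) (out : List (String × Int)) : Decidable (Spec_last_occrurrence_each_char text1 text2 out) := by unfold Spec_last_occrurrence_each_char; infer_instance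

-- ===== CLAIM (what is proved, stated in full; the proofs are below) =====
def Claim_equal_last_occrurrence_each_char : Prop := ∀ (text1 : String) (text2 : String), Dom_last_occrurrence_each_char text1 text2 → Spec_last_occrurrence_each_char text1 text2 (last_occrurrence_each_char text1 text2)

-- ===== LEMMAS AND PROOFS =====

theorem pvKey_inj : Function.Injective pvKey := by
  intro a b h
  have := congrArg String.toList h
  simpa [pvKey] using this

theorem pvKey_beq (a b : Char) : (pvKey a == pvKey b) = (a == b) := by
  by_cases h : a = b
  · simp [h]
  · simp [h, pvKey_inj.ne h]

-- rfind.go unfolding steps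
theorem rfind_go_zero (s sub : List Char) :
    PySem.Chars.rfind.go s sub 0 = if sub.isPrefixOf s then 0 else -1 := by
  rw [PySem.Chars.rfind.go]

theorem rfind_go_succ (s sub : List Char) (j : Nat) :
    PySem.Chars.rfind.go s sub (j + 1) =
      if sub.isPrefixOf (s.drop (j + 1)) then ((j : Int) + 1) else PySem.Chars.rfind.go s sub j := by
  rw [PySem.Chars.rfind.go]
  push_cast
  rfl

theorem isPrefixOf_singleton (c : Char) (a : Char) (t : List Char) :
    ([c].isPrefixOf (a :: t)) = (c == a) := by
  simp [List.isPrefixOf]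

theorem rfind_go_append_lt (xs : List Char) (x c : Char) :
    ∀ n, n < xs.length →
      PySem.Chars.rfind.go (xs ++ [x]) [c] n = PySem.Chars.rfind.go xs [c] n := by
  intro n
  induction n with
  | zero =>
    intro h
    cases xs with
    | nil => simp at h
    | cons a t => rw [rfind_go_zero, rfind_go_zero]; simp [isPrefixOf_singleton]
  | succ m ih =>
    intro h
    rw [rfind_go_succ, rfind_go_succ]
    have hle : m + 1 ≤ xs.length := by omega
    rw [List.drop_append_of_le_length hle]
    rcases hd : xs.drop (m + 1) with _ | ⟨a, t⟩
    · exfalso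
      have := List.length_drop (l := xs) (i := m + 1)
      rw [hd] at this
      simp at this
      omega
    · simp only [List.cons_append, isPrefixOf_singleton]
      rw [ih (by omega)]

theorem rfind_append_singleton (xs : List Char) (x c : Char) :
    PySem.Chars.rfind (xs ++ [x]) [c] =
      if c = x then (xs.length : Int) else PySem.Chars.rfind xs [c] := by
  unfold PySem.Chars.rfind
  simp only [List.length_append, List.length_cons, List.length_nil, Nat.zero_add]
  rw [rfind_go_succ]
  rw [List.drop_eq_nil_of_le (by simp), if_neg (by simp [List.isPrefixOf])]
  cases hL : xs.length with
  | zero =>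
    have hx : xs = [] := List.eq_nil_of_length_eq_zero hL
    subst hx
    rw [rfind_go_zero, rfind_go_zero]
    by_cases h : c = x <;> simp [h, List.isPrefixOf]
  | succ m =>
    rw [rfind_go_succ, rfind_go_succ]
    have h1 : List.drop (m + 1) xs = [] := List.drop_eq_nil_of_le (by omega)
    rw [List.drop_append_of_le_length (by omega), h1]
    simp only [List.nil_append, isPrefixOf_singleton]
    rw [rfind_go_append_lt xs x c m (by omega)]
    by_cases h : c = x
    · simp [h]
    · simp [h, List.isPrefixOf]

-- A's first loop, in enumerate form, computes exactly B's dict comprehension: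
-- keys are the distinct chars of cs in first-occurrence order, values the last index.
theorem items_enum (cs : List Char) :
    ((PySem.List.enumerate cs 0).foldl (fun d p => d.insert (pvKey p.2) p.1)
        (PySem.Dict.empty : PySem.Dict String Int)).items
      = (PySem.Set.ofList cs).map (fun c => (pvKey c, PySem.Chars.rfind cs [c])) := by
  induction cs using List.reverseRecOn with
  | nil => rfl
  | append_singleton xs x ih =>
    rw [PySem.List.enumerate_append, List.foldl_append]
    simp only [PySem.List.enumerate_cons, PySem.List.enumerate_nil, List.foldl_cons,
      List.foldl_nil, zero_add]
    have hkeys : ((PySem.List.enumerate xs 0).foldl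
        (fun (d : PySem.Dict String Int) p => d.insert (pvKey p.2) p.1)
          PySem.Dict.empty).keys = (PySem.Set.ofList xs).map pvKey := by
      simp only [PySem.Dict.keys, ih, List.map_map]
      rfl
    have hcont : ((PySem.List.enumerate xs 0).foldl
        (fun (d : PySem.Dict String Int) p => d.insert (pvKey p.2) p.1)
          PySem.Dict.empty).contains (pvKey x) = decide (x ∈ xs) := by
      by_cases hx : x ∈ xs
      · simp only [hx, decide_true]
        rw [PySem.Dict.contains_iff_mem_keys, hkeys]
        exact List.mem_map.mpr ⟨x, (PySem.Set.mem_ofList xs x).mpr hx, rfl⟩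
      · simp only [hx, decide_false]
        rw [← Bool.not_eq_true, PySem.Dict.contains_iff_mem_keys, hkeys]
        intro hmem
        rcases List.mem_map.mp hmem with ⟨y, hy, hyx⟩
        exact hx ((PySem.Set.mem_ofList xs x).mp (pvKey_inj hyx ▸ hy))
    rw [PySem.Set.ofList_append_singleton]
    by_cases hx : x ∈ xs
    · rw [PySem.Dict.items_insert_of_contains _ _ (by rw [hcont]; simp [hx])]
      rw [ih, List.map_map]
      rw [PySem.Set.add_of_mem ((PySem.Set.mem_ofList xs x).mpr hx)]
      apply List.map_congr_left
      intro c _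
      by_cases hcx : c = x
      · subst hcx
        simp [rfind_append_singleton]
      · simp [Function.comp, pvKey_beq, hcx, rfind_append_singleton]
    · rw [PySem.Dict.items_insert_of_not_contains _ _ (by rw [hcont]; simp [hx])]
      rw [ih, PySem.Set.add_of_not_mem (fun h => hx ((PySem.Set.mem_ofList xs x).mp h))]
      rw [List.map_append]
      congr 1
      · apply List.map_congr_left
        intro c hc
        have hcx : c ≠ x := fun h => hx (h ▸ (PySem.Set.mem_ofList xs c).mp hc)
        simp [rfind_append_singleton, hcx]
      · simp [rfind_append_singleton]

-- the dedup helper of A returns exactly set-of-list order (dict.fromkeys order)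
theorem lbtl_aux (cs : List Char) : ∀ (s : PySem.Set Char) (r : List Char),
    (∀ c, c ∈ s ↔ c ∈ r) →
    (cs.foldl
      (fun (p : PySem.Set Char × List Char) char =>
        if !(PySem.Set.contains p.1 char) then (PySem.Set.add p.1 char, p.2 ++ [char]) else p)
      (s, r)).2 = PySem.Set.update r cs := by
  induction cs with
  | nil => intro s r _; simp [PySem.Set.update_nil]
  | cons c cs ih =>
    intro s r h
    rw [List.foldl_cons, PySem.Set.update_cons]
    by_cases hc : c ∈ s
    · have hb : PySem.Set.contains s c = true := (PySem.Set.contains_iff s c).mpr hc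
      rw [PySem.Set.add_of_mem ((h c).mp hc)]
      simp only [hb, Bool.not_true, if_neg (by simp : ¬ (false = true))]
      exact ih s r h
    · have hb : PySem.Set.contains s c = false := by
        rw [← Bool.not_eq_true]; exact fun hh => hc ((PySem.Set.contains_iff s c).mp hh)
      rw [PySem.Set.add_of_not_mem (fun hr => hc ((h c).mpr hr))]
      simp only [hb, Bool.not_false, if_pos]
      apply ih
      intro y
      rw [PySem.Set.mem_add]
      simp [h y]
  
theorem lbtl_eq (s : String) : (loai_bo_trung_lap s).toList = PySem.Set.ofList s.toList := by
  unfold loai_bo_trung_lap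
  simp only [String.toList_ofList]
  rw [lbtl_aux s.toList PySem.Set.empty [] (by intro c; rfl)]
  exact PySem.Set.update_empty s.toList

theorem setdefault_eq_ite {d : PySem.Dict String Int} (k : String) (v : Int) :
    d.setdefault k v = if d.contains k then d else d.insert k v := by
  by_cases h : d.contains k
  · rw [PySem.Dict.setdefault_of_contains d v h]; simp [h]
  · rw [PySem.Dict.setdefault_of_not_contains d v (by simpa using h)]; simp [h]

-- the insert-if-absent loop appends exactly the fresh keys of dedup(l), each with -1
theorem items_ins (l : List Char) (d : PySem.Dict String Int) :
    (l.foldl (fun d c => if d.contains (pvKey c) then d else d.insert (pvKey c) (-1)) d).items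
      = d.items ++ ((PySem.Set.ofList l).filter
          (fun c => !(d.contains (pvKey c)))).map (fun c => (pvKey c, (-1 : Int))) := by
  induction l generalizing d with
  | nil => simp [PySem.Set.ofList]
  | cons c l ih =>
    rw [List.foldl_cons, PySem.Set.ofList_cons]
    by_cases hc : d.contains (pvKey c)
    · rw [if_pos hc, ih d]
      rw [List.filter_cons_of_neg (by simp [hc])]
      show _ = d.items ++ (List.filter _ (List.filter (fun y => !(y == c)) _)).map _
      rw [List.filter_filter]
      have hfun : (fun y => (!(d.contains (pvKey y))) && !(y == c))
          = fun y => !(d.contains (pvKey y)) := by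
        funext y
        by_cases hy : y = c
        · subst hy; simp [hc]
        · simp [hy]
      rw [hfun]
    · rw [if_neg hc, ih]
      rw [PySem.Dict.items_insert_of_not_contains d _ (by simpa using hc)]
      rw [List.filter_cons_of_pos (by simp [hc]), List.map_cons]
      rw [List.append_assoc, List.singleton_append]
      congr 2
      rw [show (PySem.Set.ofList l).discard c
          = List.filter (fun y => !(y == c)) (PySem.Set.ofList l) from rfl, List.filter_filter]
      have hfun : (fun y => !((d.insert (pvKey c) (-1)).contains (pvKey y)))
          = fun y => (!(d.contains (pvKey y))) && !(y == c) := by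
        funext y
        rw [PySem.Dict.contains_insert, pvKey_beq]
        by_cases hy : y = c
        · subst hy; simp [hc]
        · simp [Bool.and_comm]
      rw [hfun]

-- ===== VERDICT (by name: the statement is the Claim_ definition above) =====
theorem last_occrurrence_each_char_spec : Claim_equal_last_occrurrence_each_char := by
  unfold Claim_equal_last_occrurrence_each_char
  intro t1 t2 _
  unfold Spec_last_occrurrence_each_char
  simp only [last_occrurrence_each_char, last_occrurrence_each_char_alt]
  have hA1 : (PySem.List.pyRange 0 (PySem.Str.len t1) 1).foldl
      (fun (d : PySem.Dict String Int) i => d.insert (pvKey (PySem.List.pyGetD t1.toList i ' ')) i)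
      PySem.Dict.empty
    = (PySem.List.enumerate t1.toList 0).foldl
        (fun (d : PySem.Dict String Int) p => d.insert (pvKey p.2) p.1) PySem.Dict.empty := by
    rw [PySem.List.enumerate_eq_map_pyRange t1.toList ' ', List.foldl_map]
    rw [PySem.Str.len_eq]
    simp [PySem.List.len_eq]
  have hA2 : ∀ d0 : PySem.Dict String Int,
      (PySem.List.pyRange 0 (PySem.Str.len (loai_bo_trung_lap t2)) 1).foldl
        (fun d i =>
          if d.contains (pvKey (PySem.List.pyGetD (loai_bo_trung_lap t2).toList i ' ')) then d
          else d.insert (pvKey (PySem.List.pyGetD (loai_bo_trung_lap t2).toList i ' ')) (-1)) d0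
      = (PySem.Set.ofList t2.toList).foldl
          (fun d c => if d.contains (pvKey c) then d else d.insert (pvKey c) (-1)) d0 := by
    intro d0
    rw [PySem.Str.len_eq]
    rw [PySem.List.foldl_pyRange_zero_pyGetD' (loai_bo_trung_lap t2).toList ' '
      (fun (d : PySem.Dict String Int) c =>
        if d.contains (pvKey c) then d else d.insert (pvKey c) (-1)) d0]
    rw [lbtl_eq t2]
  have hB1 : PySem.Dict.ofList ((PySem.List.dedup t1.toList).map
        (fun c => (pvKey c, PySem.Str.rfind t1 (pvKey c))))
      = (PySem.List.enumerate t1.toList 0).foldl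
          (fun (d : PySem.Dict String Int) p => d.insert (pvKey p.2) p.1) PySem.Dict.empty := by
    apply PySem.Dict.ext
    rw [items_enum]
    show (List.foldl (fun (acc : PySem.Dict String Int) p => acc.insert p.1 p.2)
        PySem.Dict.empty ((PySem.List.dedup t1.toList).map
          (fun c => (pvKey c, PySem.Str.rfind t1 (pvKey c))))).items = _
    rw [List.foldl_map]
    rw [PySem.Dict.items_foldl_insert_fresh (PySem.List.dedup t1.toList)
        (fun c => pvKey c) (fun c => PySem.Str.rfind t1 (pvKey c)) PySem.Dict.empty
        (fun a _ => PySem.Dict.contains_empty _)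
        (by simpa using (PySem.Set.nodup_ofList t1.toList).map pvKey_inj)]
    simp only [PySem.List.dedup_eq_ofList]
    show PySem.Dict.empty.items ++ _ = _
    rw [show (PySem.Dict.empty : PySem.Dict String Int).items = [] from rfl, List.nil_append]
    apply List.map_congr_left
    intro c _
    simp [PySem.Str.rfind_eq, pvKey]
  have hB2 : ∀ d0 : PySem.Dict String Int,
      t2.toList.foldl (fun d c => d.setdefault (pvKey c) (-1)) d0
      = t2.toList.foldl
          (fun d c => if d.contains (pvKey c) then d else d.insert (pvKey c) (-1)) d0 := by
    intro d0
    simp only [setdefault_eq_ite]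
  rw [hA1, hA2, hB1, hB2, items_ins, items_ins, PySem.Set.ofList_ofList]
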